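-- pv_equiv track=rewrite | github.com/AbhishekChamp/Python_DSA | 06_Arrays_Exercises/03_Best_Score.py | firstSecond
-- ===== SOURCE A (Python) =====
-- def firstSecond(myList):
--     max1, max2 = 0, 0
--     for i in range(len(myList)):
--         if(myList[i] > max2 and max1 != myList[i]):
--             max2 = myList[i]
--             if(max2 > max1):
--                 max1, max2 = max2, max1
--     return max1,max2
-- ===== SOURCE B (Python) =====
-- def firstSecond(myList):
--     uniq = sorted({x for x in myList if x > 0}, reverse=True)
--     max1 = uniq[0] if uniq else 0
--     max2 = uniq[1] if len(uniq) > 1 else 0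
--     return max1, max2
-- ===== Notes on version B (the rewrite author's own statement) =====
-- stated objective: simpler
-- what changed: Replaces the single-pass running-max-and-swap loop by building the set of distinct strictly-positive values, sorting it descending and reading off the first two entries (defaulting to 0).
import Mathlib
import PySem

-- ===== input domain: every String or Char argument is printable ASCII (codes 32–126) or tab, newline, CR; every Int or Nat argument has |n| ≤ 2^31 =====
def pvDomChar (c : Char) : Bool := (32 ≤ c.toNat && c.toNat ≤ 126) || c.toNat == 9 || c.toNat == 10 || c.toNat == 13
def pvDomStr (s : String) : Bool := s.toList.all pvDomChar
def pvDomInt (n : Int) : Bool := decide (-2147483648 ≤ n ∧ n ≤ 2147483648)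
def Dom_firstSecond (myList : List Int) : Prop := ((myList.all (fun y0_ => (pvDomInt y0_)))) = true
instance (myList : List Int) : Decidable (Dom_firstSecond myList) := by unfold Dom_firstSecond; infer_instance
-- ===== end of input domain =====

-- B replaces A's single-pass running-max-and-swap loop by sorting the set of distinct
-- strictly-positive values descending and reading off the first two entries (simpler).


-- ===== PORT A =====
-- loop body of A: 'if myList[i] > max2 and max1 != myList[i]: max2 = myList[i]; if max2 > max1: swap'
def firstSecondStep (s : Int × Int) (x : Int) : Int × Int :=
  if x > s.2 ∧ s.1 ≠ x then
    let m2 := x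
    if m2 > s.1 then (m2, s.1) else (s.1, m2)
  else s

def firstSecond (myList : List Int) : Int × Int :=
  (PySem.List.pyRange 0 (PySem.List.len myList)).foldl
    (fun s i => firstSecondStep s (PySem.List.pyGetD myList i 0)) (0, 0)

-- ===== PORT B =====
def firstSecond_alt (myList : List Int) : Int × Int :=
  let uniq := PySem.List.sorted
    (PySem.Set.ofList (myList.filter (fun x => decide (0 < x)))) (fun x => x) true
  (match uniq with | [] => 0 | a :: _ => a,
   match uniq with | _ :: b :: _ => b | _ => 0)

-- ===== PRECONDITION & SPEC =====
def Spec_firstSecond (myList : List Int) (out : Int × Int) : Prop := out = firstSecond_alt myList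
instance (myList : List Int) (out : Int × Int) : Decidable (Spec_firstSecond myList out) := by unfold Spec_firstSecond; infer_instance

-- ===== CLAIM (what is proved, stated in full; the proofs are below) =====
def Claim_equal_firstSecond : Prop := ∀ (myList : List Int), Dom_firstSecond myList → Spec_firstSecond myList (firstSecond myList)

-- ===== LEMMAS AND PROOFS =====

-- proof-side characterisation: largest value (floored at 0) and largest strictly-smaller value
def pvM (xs : List Int) : Int := xs.foldl max 0
def pvS (xs : List Int) : Int := (xs.filter (fun x => decide (x < pvM xs))).foldl max 0

lemma fold0_eq (l : List Int) (v : Int) (h0 : 0 ≤ v) (hub : ∀ y ∈ l, y ≤ v)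
    (hmem : v = 0 ∨ v ∈ l) : l.foldl max 0 = v := by
  have h1 := PySem.List.le_foldl_max l 0
  have h2 := PySem.List.foldl_max_mem l 0
  apply le_antisymm
  · rcases h2 with h | h
    · rw [h]; exact h0
    · exact hub _ h
  · rcases hmem with h | h
    · rw [h]; exact h1.1
    · exact h1.2 _ h

lemma pvM_nonneg (xs : List Int) : 0 ≤ pvM xs := (PySem.List.le_foldl_max xs 0).1
lemma pvM_ub (xs : List Int) : ∀ y ∈ xs, y ≤ pvM xs := (PySem.List.le_foldl_max xs 0).2

lemma pvS_nonneg (xs : List Int) : 0 ≤ pvS xs := (PySem.List.le_foldl_max _ 0).1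

lemma pvS_le_pvM (xs : List Int) : pvS xs ≤ pvM xs := by
  rcases PySem.List.foldl_max_mem (xs.filter (fun x => decide (x < pvM xs))) 0 with h | h
  · rw [pvS, h]; exact pvM_nonneg xs
  · have := List.mem_filter.1 h
    have : pvS xs < pvM xs := by simpa using this.2
    exact this.le

lemma pvM_append (xs : List Int) (x : Int) : pvM (xs ++ [x]) = max (pvM xs) x := by
  simp [pvM, List.foldl_append]

lemma A_fold (xs : List Int) : xs.foldl firstSecondStep (0, 0) = (pvM xs, pvS xs) := by
  induction xs using List.reverseRecOn with
  | nil => simp [pvM, pvS]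
  | append_singleton xs x ih =>
    rw [List.foldl_append, ih]
    have hub := pvM_ub xs
    have hM0 := pvM_nonneg xs
    have hSM := pvS_le_pvM xs
    have hS0 := pvS_nonneg xs
    by_cases hx : pvM xs < x
    · -- new maximum: state becomes (x, pvM xs)
      have hM' : pvM (xs ++ [x]) = x := by rw [pvM_append]; omega
      have hfilt : (xs ++ [x]).filter (fun y => decide (y < pvM (xs ++ [x]))) = xs := by
        rw [hM', List.filter_append]
        have : xs.filter (fun y => decide (y < x)) = xs :=
          List.filter_eq_self.2 (fun a ha => by simpa using lt_of_le_of_lt (hub a ha) hx)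
        simp [this]
      have hS' : pvS (xs ++ [x]) = pvM xs := by rw [pvS, hfilt, pvM]
      rw [hM', hS']; simp only [List.foldl_cons, List.foldl_nil, firstSecondStep]
      have hcond : x > pvS xs ∧ pvM xs ≠ x := ⟨by omega, by omega⟩
      rw [if_pos hcond, if_pos (by omega)]
    · -- x ≤ pvM xs
      have hM' : pvM (xs ++ [x]) = pvM xs := by rw [pvM_append]; omega
      by_cases hxe : x = pvM xs
      · -- equal to current maximum: nothing changes
        have hfilt : (xs ++ [x]).filter (fun y => decide (y < pvM (xs ++ [x]))) =
            xs.filter (fun y => decide (y < pvM xs)) := by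
          rw [hM', List.filter_append]
          simp [hxe]
        have hS' : pvS (xs ++ [x]) = pvS xs := by rw [pvS, hfilt, pvS]
        rw [hM', hS']; simp only [List.foldl_cons, List.foldl_nil, firstSecondStep]
        rw [if_neg (by omega)]
      · -- x < pvM xs
        have hxlt : x < pvM xs := by omega
        have hfilt : (xs ++ [x]).filter (fun y => decide (y < pvM (xs ++ [x]))) =
            xs.filter (fun y => decide (y < pvM xs)) ++ [x] := by
          rw [hM', List.filter_append]
          simp [hxlt]
        have hS' : pvS (xs ++ [x]) = max (pvS xs) x := by
          rw [pvS, hfilt, List.foldl_append, pvS]; rfl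
        rw [hM', hS']; simp only [List.foldl_cons, List.foldl_nil, firstSecondStep]
        by_cases hxs : pvS xs < x
        · rw [if_pos ⟨by omega, by omega⟩, if_neg (by omega)]
          congr 1; omega
        · rw [if_neg (by omega)]
          congr 1; omega

lemma A_eq (xs : List Int) : firstSecond xs = (pvM xs, pvS xs) := by
  rw [firstSecond,
    PySem.List.foldl_pyRange_pyGetD xs 0 firstSecondStep (0, 0) (le_refl 0)]
  simpa using A_fold xs

lemma B_eq (xs : List Int) : firstSecond_alt xs = (pvM xs, pvS xs) := by
  rw [firstSecond_alt]
  have hperm := PySem.List.sorted_perm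
    (PySem.Set.ofList (xs.filter (fun x => decide (0 < x)))) (fun x => x) true
  have hpair := PySem.List.sorted_pairwise_rev
    (PySem.Set.ofList (xs.filter (fun x => decide (0 < x)))) (fun x => x)
  have hnd : (PySem.List.sorted
      (PySem.Set.ofList (xs.filter (fun x => decide (0 < x)))) (fun x => x) true).Nodup :=
    hperm.nodup_iff.2 (PySem.Set.nodup_ofList _)
  have hmem : ∀ y, y ∈ PySem.List.sorted
      (PySem.Set.ofList (xs.filter (fun x => decide (0 < x)))) (fun x => x) true ↔
      y ∈ xs ∧ 0 < y := by
    intro y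
    rw [hperm.mem_iff, PySem.Set.mem_ofList, List.mem_filter]
    simp
  rcases hu : PySem.List.sorted
      (PySem.Set.ofList (xs.filter (fun x => decide (0 < x)))) (fun x => x) true with
    _ | ⟨a, _ | ⟨b, rest⟩⟩ <;> rw [hu] at hmem hpair hnd
  · -- no positive element
    have hnp : ∀ y ∈ xs, y ≤ 0 := by
      intro y hy
      by_contra h
      exact absurd ((hmem y).2 ⟨hy, by omega⟩) (List.not_mem_nil)
    have hM : pvM xs = 0 := fold0_eq xs 0 le_rfl hnp (Or.inl rfl)
    have hS : pvS xs = 0 := by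
      refine fold0_eq _ 0 le_rfl (fun y hy => ?_) (Or.inl rfl)
      exact hnp y (List.mem_filter.1 hy).1
    simp [hM, hS]
  · -- exactly one distinct positive value a
    have ha := (hmem a).1 (by simp)
    have hM : pvM xs = a := by
      refine fold0_eq xs a ha.2.le (fun y hy => ?_) (Or.inr ha.1)
      by_cases h : 0 < y
      · have := (hmem y).2 ⟨hy, h⟩; simp at this; omega
      · omega
    have hS : pvS xs = 0 := by
      refine fold0_eq _ 0 le_rfl (fun y hy => ?_) (Or.inl rfl)
      obtain ⟨hyx, hlt⟩ := List.mem_filter.1 hy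
      rw [hM] at hlt; simp at hlt
      by_contra h
      have := (hmem y).2 ⟨hyx, by omega⟩; simp at this; omega
    simp [hM, hS]
  · -- at least two distinct positive values: a is the max, b the second
    have ha := (hmem a).1 (by simp)
    have hb := (hmem b).1 (by simp)
    have hba : b ≤ a := (List.pairwise_cons.1 hpair).1 b (by simp)
    have hab : a ≠ b := by
      intro h; exact (List.nodup_cons.1 hnd).1 (by simp [h])
    have htail : ∀ y ∈ rest, y ≤ b := (List.pairwise_cons.1 (List.pairwise_cons.1 hpair).2).1
    have hM : pvM xs = a := by
      refine fold0_eq xs a ha.2.le (fun y hy => ?_) (Or.inr ha.1)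
      by_cases h : 0 < y
      · have := (hmem y).2 ⟨hy, h⟩
        simp only [List.mem_cons] at this
        rcases this with h1 | h1 | h1
        · omega
        · omega
        · exact le_trans (htail y h1) hba
      · omega
    have hS : pvS xs = b := by
      refine fold0_eq _ b hb.2.le (fun y hy => ?_) (Or.inr ?_)
      · obtain ⟨hyx, hlt⟩ := List.mem_filter.1 hy
        rw [hM] at hlt; simp at hlt
        by_cases h : 0 < y
        · have := (hmem y).2 ⟨hyx, h⟩
          simp only [List.mem_cons] at this
          rcases this with h1 | h1 | h1
          · omega
          · omega
          · exact htail y h1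
        · omega
      · exact List.mem_filter.2 ⟨hb.1, by simp [hM]; omega⟩
    simp [hM, hS]

-- ===== VERDICT (by name: the statement is the Claim_ definition above) =====
theorem firstSecond_spec : Claim_equal_firstSecond := by
  intro xs _
  unfold Spec_firstSecond
  rw [A_eq, B_eq]
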